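-- pv_equiv track=rewrite | github.com/vickyy5/everybodycodes-AdvOfCode | AdvOfCode25/d3/main.py | getMaxBat
-- ===== SOURCE A (Python) =====
-- def getMaxBat(line):
--     mx = 0
--     ind = 0
--     for i,n in enumerate(line):
--         if int(n) > mx:
--             mx = int(n)
--             ind = int(i)
--
--     return mx,ind
-- ===== SOURCE B (Python) =====
-- def getMaxBat(line):
--     d = [int(n) for n in line]
--     mx = max(d, default=0)
--     if mx <= 0:
--         return 0, 0
--     return mx, d.index(mx)
-- ===== Notes on version B (the rewrite author's own statement) =====
-- stated objective: simpler
-- what changed: replaces A's single fused running-max loop over enumerate with a three-step decomposition: parse all digits into a list, take max() with a <=0 guard, then locate it with list.index()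
import Mathlib
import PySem

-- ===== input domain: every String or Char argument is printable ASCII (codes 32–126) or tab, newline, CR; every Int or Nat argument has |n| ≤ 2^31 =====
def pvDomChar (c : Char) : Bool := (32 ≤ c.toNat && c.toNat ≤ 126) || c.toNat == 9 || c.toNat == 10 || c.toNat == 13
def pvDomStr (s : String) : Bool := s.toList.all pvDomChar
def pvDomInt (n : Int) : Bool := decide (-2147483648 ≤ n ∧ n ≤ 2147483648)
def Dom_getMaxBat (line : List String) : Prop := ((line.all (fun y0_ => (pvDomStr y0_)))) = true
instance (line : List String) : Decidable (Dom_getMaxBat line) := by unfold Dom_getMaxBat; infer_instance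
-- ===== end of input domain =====

-- B replaces A's fused running-max loop with parse-all / max / index passes; objective: simpler.

-- ===== PORT A =====
-- fused loop: for i,n in enumerate(line): if int(n) > mx: mx, ind = int(n), int(i)
def getMaxBat (line : List String) : Int × Int :=
  (PySem.List.enumerate line 0).foldl
    (fun st p =>
      if (PySem.Int.ofStr? p.2).getD 0 > st.1 then ((PySem.Int.ofStr? p.2).getD 0, p.1) else st)
    (0, 0)

-- ===== PORT B =====
-- d = [int(n) for n in line]; mx = max(d, default=0); if mx <= 0: (0,0) else (mx, d.index(mx))
def getMaxBat_alt (line : List String) : Int × Int :=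
  let d := line.map (fun n => (PySem.Int.ofStr? n).getD 0)
  let mx := match PySem.List.max? d (fun x => x) with
    | none => 0
    | some m => m
  if mx ≤ 0 then (0, 0)
  else (mx, ((PySem.List.index? d mx).getD 0 : Nat))

-- ===== PRECONDITION & SPEC =====
-- Pre_ excludes exactly the inputs where Python's int(n) raises ValueError (both A and B raise there).
def Pre_getMaxBat (line : List String) : Prop :=
  ∀ s ∈ line, (PySem.Int.ofStr? s).isSome
instance (line : List String) : Decidable (Pre_getMaxBat line) := by unfold Pre_getMaxBat; infer_instance
def pvWitness_getMaxBat : List String := ["3", "1", "4", "1"]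
def Spec_getMaxBat (line : List String) (out : Int × Int) : Prop := out = getMaxBat_alt line
instance (line : List String) (out : Int × Int) : Decidable (Spec_getMaxBat line out) := by unfold Spec_getMaxBat; infer_instance

-- ===== CLAIM (what is proved, stated in full; the proofs are below) =====
def Claim_equal_getMaxBat : Prop := ∀ (line : List String), Dom_getMaxBat line → Pre_getMaxBat line → Spec_getMaxBat line (getMaxBat line)

-- ===== LEMMAS AND PROOFS =====

-- A's loop body, on the parsed integer list
def pvLoop (d : List Int) (s : Int) (st : Int × Int) : Int × Int :=
  (PySem.List.enumerate d s).foldl (fun st p => if p.2 > st.1 then (p.2, p.1) else st) st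

lemma pvLoop_map (line : List String) (f : String → Int) (s : Int) (st : Int × Int) :
    (PySem.List.enumerate line s).foldl
      (fun st p => if f p.2 > st.1 then (f p.2, p.1) else st) st
      = pvLoop (line.map f) s st := by
  induction line generalizing s st with
  | nil => simp [pvLoop, PySem.List.enumerate_nil]
  | cons x t ih =>
      simp only [pvLoop, List.map_cons, PySem.List.enumerate_cons, List.foldl_cons]
      exact ih (s + 1) _

lemma foldl_max_max (t : List Int) (a b : Int) :
    t.foldl max (max a b) = max a (t.foldl max b) := by
  induction t generalizing b with
  | nil => simp
  | cons x t ih =>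
      simp only [List.foldl_cons]
      rw [max_assoc, ih]

lemma pvLoop_spec (d : List Int) (s m ind : Int) :
    pvLoop d s (m, ind) =
      if d.foldl max m = m then (m, ind)
      else (d.foldl max m, s + ((PySem.List.index? d (d.foldl max m)).getD 0 : Nat)) := by
  induction d generalizing s m ind with
  | nil => simp [pvLoop, PySem.List.enumerate_nil]
  | cons x t ih =>
      have hmem : ∀ (a : Int), t.foldl max a ≠ a → t.foldl max a ∈ t := by
        intro a ha
        have h := PySem.List.max?_mem (xs := a :: t) (key := fun y => y)
          (m := t.foldl max a) (by rw [PySem.List.max?_id_cons])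
        rcases List.mem_cons.mp h with h | h
        · exact absurd h ha
        · exact h
      have hle : ∀ (a : Int), a ≤ t.foldl max a := fun a => (PySem.List.le_foldl_max t a).1
      simp only [pvLoop, PySem.List.enumerate_cons, List.foldl_cons, List.foldl_cons] at *
      by_cases hx : x > m
      · -- branch taken: state becomes (x, s)
        rw [if_pos hx]
        rw [ih (s+1) x s]
        have hmx : max m x = x := max_eq_right (le_of_lt hx)
        by_cases h1 : t.foldl max x = x
        · -- whole max is x, first occurrence at head
          rw [if_pos h1, hmx, h1]
          have hne : x ≠ m := ne_of_gt hx
          rw [if_neg hne]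
          rw [PySem.List.index?_cons_self]
          simp
        · rw [if_neg h1, hmx]
          have hMx : x < t.foldl max x := lt_of_le_of_ne (hle x) (Ne.symm h1)
          have hMm : t.foldl max x ≠ m := ne_of_gt (lt_trans hx hMx)
          rw [if_neg hMm]
          have hxM : x ≠ t.foldl max x := ne_of_lt hMx
          rw [PySem.List.index?_cons_of_ne t hxM]
          have hmem' : t.foldl max x ∈ t := hmem x h1
          rcases (PySem.List.index?_isSome_iff (xs := t) (v := t.foldl max x)).2 hmem'
            |> Option.isSome_iff_exists.mp with ⟨k, hk⟩
          rw [hk]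
          simp [Option.getD]
          omega
      · -- branch not taken
        rw [if_neg hx]
        rw [ih (s+1) m ind]
        have hmx : max m x = m := max_eq_left (le_of_not_gt hx)
        rw [hmx]
        by_cases h1 : t.foldl max m = m
        · rw [if_pos h1, if_pos h1]
        · rw [if_neg h1, if_neg h1]
          have hMm : m < t.foldl max m := lt_of_le_of_ne (hle m) (Ne.symm h1)
          have hxM : x ≠ t.foldl max m := ne_of_lt (lt_of_le_of_lt (le_of_not_gt hx) hMm)
          rw [PySem.List.index?_cons_of_ne t hxM]
          have hmem' : t.foldl max m ∈ t := hmem m h1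
          rcases (PySem.List.index?_isSome_iff (xs := t) (v := t.foldl max m)).2 hmem'
            |> Option.isSome_iff_exists.mp with ⟨k, hk⟩
          rw [hk]
          simp [Option.getD]
          omega

def pvAltCore (d : List Int) : Int × Int :=
  let mx := match PySem.List.max? d (fun x => x) with
    | none => 0
    | some m => m
  if mx ≤ 0 then (0, 0)
  else (mx, ((PySem.List.index? d mx).getD 0 : Nat))

lemma pvAltCore_eq (d : List Int) : pvLoop d 0 (0, 0) = pvAltCore d := by
  rw [pvLoop_spec d 0 0 0]
  cases d with
  | nil => simp [pvAltCore, PySem.List.max?]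
  | cons x t =>
      unfold pvAltCore
      rw [PySem.List.max?_id_cons]
      have hM : (x :: t).foldl max 0 = max 0 (t.foldl max x) := by
        simp only [List.foldl_cons]
        rw [show max (0:Int) x = max 0 (max 0 x) from by omega, foldl_max_max t 0 (max 0 x),
            foldl_max_max t 0 x]
        omega
      rw [hM]
      by_cases hpos : t.foldl max x ≤ 0
      · rw [max_eq_left hpos]
        simp [hpos]
      · have hmx : max 0 (t.foldl max x) = t.foldl max x := max_eq_right (le_of_not_ge hpos)
        rw [hmx, if_neg (by omega : t.foldl max x ≠ 0)]
        simp [hpos]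

-- ===== VERDICT (by name: the statement is the Claim_ definition above) =====
theorem getMaxBat_spec : Claim_equal_getMaxBat := by
  intro line _ _
  show getMaxBat line = getMaxBat_alt line
  unfold getMaxBat
  rw [pvLoop_map line (fun n => (PySem.Int.ofStr? n).getD 0) 0 (0, 0), pvAltCore_eq]
  rfl
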